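-- pv_equiv track=rewrite | github.com/jerodg/code-challenges | python/98.ScratchPad/test3.py | max_temp
-- ===== SOURCE A (Python) =====
-- def max_temp(tmp):
--     min = tmp[0]
--     max = 0
--
--     for i in range(len(tmp)):
--         if tmp[i] < min:
--             min = tmp[i]
--         elif (tmp[i] - min) > max:
--             max = tmp[i] - min
--
--     return max
-- ===== SOURCE B (Python) =====
-- def max_temp(tmp):
--     prev = tmp[0]
--     best = 0
--     cur = 0
--     for x in tmp[1:]:
--         cur = max(0, cur + (x - prev))
--         best = max(best, cur)
--         prev = x
--     return best
-- ===== Notes on version B (the rewrite author's own statement) =====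
-- stated objective: alternative
-- what changed: Replaces the running-minimum scan with Kadane's maximum-subarray pass over consecutive differences, maintaining (best, current streak, previous element) instead of (min so far, max rise).
import Mathlib
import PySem

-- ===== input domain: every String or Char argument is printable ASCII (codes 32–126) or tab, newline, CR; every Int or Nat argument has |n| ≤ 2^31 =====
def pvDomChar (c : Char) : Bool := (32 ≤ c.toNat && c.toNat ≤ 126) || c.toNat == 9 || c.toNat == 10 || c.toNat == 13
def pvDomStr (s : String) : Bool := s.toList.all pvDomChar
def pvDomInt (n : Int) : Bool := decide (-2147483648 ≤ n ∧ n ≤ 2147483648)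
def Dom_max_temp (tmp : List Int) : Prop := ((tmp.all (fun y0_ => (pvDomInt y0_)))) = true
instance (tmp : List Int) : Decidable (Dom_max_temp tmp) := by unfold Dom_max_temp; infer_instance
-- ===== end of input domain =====

-- B replaces A's running-minimum scan with a Kadane-style running-streak pass over
-- consecutive differences (alternative algorithm, same cost); Pre_ excludes the empty
-- list, on which both Pythons raise IndexError.


-- ===== PORT A =====
-- A's loop body: state (min, max); the branch order follows the Python.
def maxTempStepA (st : Int × Int) (x : Int) : Int × Int :=
  if x < st.1 then (x, st.2)
  else if x - st.1 > st.2 then (st.1, x - st.1)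
  else st

def max_temp (tmp : List Int) : Int :=
  match tmp with
  | [] => 0          -- indexing the first element raises IndexError in Python; excluded by Pre_max_temp
  | t0 :: _ => (tmp.foldl maxTempStepA (t0, 0)).2

-- ===== PORT B =====
-- B's loop body: state (best, cur, prev), Kadane over consecutive differences.
def maxTempStepB (st : Int × Int × Int) (x : Int) : Int × Int × Int :=
  let cur := max 0 (st.2.1 + (x - st.2.2))
  (max st.1 cur, cur, x)

def max_temp_alt (tmp : List Int) : Int :=
  match tmp with
  | [] => 0          -- indexing the first element raises IndexError in Python; excluded by Pre_max_temp
  | t0 :: rest => (rest.foldl maxTempStepB (0, 0, t0)).1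

-- ===== PRECONDITION & SPEC =====
-- Pre_ excludes only the empty list, where both Pythons raise IndexError indexing the first element.
def Pre_max_temp (tmp : List Int) : Prop := tmp ≠ []
instance (tmp : List Int) : Decidable (Pre_max_temp tmp) := by unfold Pre_max_temp; infer_instance
def pvWitness_max_temp : List Int := [3, 1, 4, 1, 5]

def Spec_max_temp (tmp : List Int) (out : Int) : Prop := out = max_temp_alt tmp
instance (tmp : List Int) (out : Int) : Decidable (Spec_max_temp tmp out) := by unfold Spec_max_temp; infer_instance

-- ===== CLAIM (what is proved, stated in full; the proofs are below) =====
def Claim_equal_max_temp : Prop := ∀ (tmp : List Int), Dom_max_temp tmp → Pre_max_temp tmp → Spec_max_temp tmp (max_temp tmp)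

-- ===== LEMMAS AND PROOFS =====

-- Loop invariant: if the A-state (mn, mx) and the B-state (best, cur, prev) describe the
-- same processed prefix (mn ≤ prev, cur = prev - mn, best = mx, 0 ≤ mx), the folds agree.
theorem maxTemp_fold_agree (rest : List Int) :
    ∀ (mn mx best cur prev : Int), mn ≤ prev → cur = prev - mn → best = mx → 0 ≤ mx →
      (rest.foldl maxTempStepA (mn, mx)).2 = (rest.foldl maxTempStepB (best, cur, prev)).1 := by
  induction rest with
  | nil => intro mn mx best cur prev _ _ hbm _; simpa using hbm.symm
  | cons x xs ih =>
    intro mn mx best cur prev hle hcur hbm hmx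
    simp only [List.foldl_cons, maxTempStepA, maxTempStepB]
    by_cases hx : x < mn
    · rw [if_pos hx]
      have h0 : max 0 (cur + (x - prev)) = 0 := by omega
      rw [h0]
      have hb : max best 0 = mx := by omega
      rw [hb]
      exact ih x mx mx 0 x le_rfl (by ring) rfl hmx
    · rw [if_neg hx]
      have hcur' : max 0 (cur + (x - prev)) = x - mn := by omega
      rw [hcur']
      by_cases hgt : x - mn > mx
      · rw [if_pos hgt]
        have hb : max best (x - mn) = x - mn := by omega
        rw [hb]
        exact ih mn (x - mn) (x - mn) (x - mn) x (by omega) (by ring) rfl (by omega)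
      · rw [if_neg hgt]
        have hb : max best (x - mn) = mx := by omega
        rw [hb]
        exact ih mn mx mx (x - mn) x (by omega) (by ring) rfl hmx

-- ===== VERDICT (by name: the statement is the Claim_ definition above) =====
theorem max_temp_spec : Claim_equal_max_temp := by
  intro tmp _ hpre
  unfold Spec_max_temp max_temp max_temp_alt
  match tmp with
  | [] => exact absurd rfl hpre
  | t0 :: rest =>
    simp only [List.foldl_cons]
    have h0 : maxTempStepA (t0, 0) t0 = (t0, 0) := by
      simp [maxTempStepA]
    rw [h0]
    exact maxTemp_fold_agree rest t0 0 0 0 t0 le_rfl (by ring) rfl le_rfl
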